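-- pv_equiv track=rewrite | github.com/raeez/chiral-bar-cobar | compute/lib/shadow_cohft_independent.py | wn_reduced_weight_dimensions
-- ===== SOURCE A (Python) =====
-- from typing import Dict, List, Tuple
--
-- def wn_reduced_weight_dimensions(N: int, max_q: int = 10) -> List[int]:
--     """
--     Compute K_q(W_N) = dim of the q-th reduced-weight piece of
--     bar cohomology, where each strong generator contributes at
--     reduced weight 1 regardless of conformal spin.
--
--     For W_N with generators of spins 2, 3, ..., N, the reduced-
--     weight generating function is the (N-1)-fold convolution of
--     the partition generating function:
--
--         sum_q K_q x^q = prod_{s=2}^{N} 1/(1-x)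
--                       = 1/(1-x)^{N-1}
--
--     Hence K_q = binom(q + N - 2, N - 2) = (N-1)-component
--     partition number p_{N-1}(q).
--
--     At leading order (ignoring nonlinear OPE corrections), this
--     gives the "free-field" bar cohomology dimensions.
--     """
--     # (N-1)-fold convolution: K_q = binom(q + N - 2, N - 2)
--     result = []
--     for q in range(max_q + 1):
--         k = 1
--         for j in range(1, N - 1):
--             k = k * (q + j) // j
--         result.append(k)
--     return result
-- ===== SOURCE B (Python) =====
-- def wn_reduced_weight_dimensions(N: int, max_q: int = 10):
--     """Incremental recurrence K_q = K_{q-1}*(q+N-2)//q (exact), instead of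
--     recomputing the binomial product for every q; O(max_q) multiplications."""
--     if max_q < 0:
--         return []
--     if N <= 2:
--         return [1] * (max_q + 1)
--     out = [1]
--     k = 1
--     for q in range(1, max_q + 1):
--         k = k * (q + N - 2) // q
--         out.append(k)
--     return out
-- ===== Notes on version B (the rewrite author's own statement) =====
-- stated objective: faster
-- what changed: B replaces A's per-q inner product loop (recomputing the binomial C(q+N-2,N-2) from scratch for every q) by a single incremental recurrence K_q = K_{q-1}*(q+N-2)//q, with the trivial N<=2 case returning all ones directly.
import Mathlib
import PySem

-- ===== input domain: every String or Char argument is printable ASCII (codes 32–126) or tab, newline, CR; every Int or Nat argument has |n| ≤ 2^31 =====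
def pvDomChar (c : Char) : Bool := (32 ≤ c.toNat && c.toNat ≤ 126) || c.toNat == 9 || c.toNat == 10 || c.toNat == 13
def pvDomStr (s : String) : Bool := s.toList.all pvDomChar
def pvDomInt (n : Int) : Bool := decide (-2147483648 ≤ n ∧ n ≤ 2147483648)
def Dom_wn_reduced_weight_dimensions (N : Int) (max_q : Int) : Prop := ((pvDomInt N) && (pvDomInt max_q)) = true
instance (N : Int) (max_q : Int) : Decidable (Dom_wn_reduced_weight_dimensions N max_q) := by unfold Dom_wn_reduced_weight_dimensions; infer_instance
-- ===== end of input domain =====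

-- B computes each K_q from K_{q-1} by one exact multiply/divide instead of A's
-- per-q inner product loop; objective: faster (O(max_q) vs O(max_q·N)).

-- ===== PORT A =====
-- literal transliteration of A: outer loop over q = 0..max_q, inner loop
-- k = k*(q+j)//j for j = 1..N-2, appending each k.
def wn_reduced_weight_dimensions (N : Int) (max_q : Int) : List Int :=
  (PySem.List.pyRange 0 (max_q + 1)).foldl
    (fun result q =>
      result ++ [ (PySem.List.pyRange 1 (N - 1)).foldl
                    (fun k j => PySem.Int.floordiv (k * (q + j)) j) 1 ])
    []

-- ===== PORT B =====
-- literal transliteration of B: early returns for max_q < 0 and N ≤ 2, then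
-- one loop over q = 1..max_q carrying (out, k) with k = k*(q+N-2)//q.
def wn_reduced_weight_dimensions_alt (N : Int) (max_q : Int) : List Int :=
  if max_q < 0 then []
  else if N ≤ 2 then List.replicate (max_q + 1).toNat 1
  else
    ((PySem.List.pyRange 1 (max_q + 1)).foldl
      (fun (st : List Int × Int) q =>
        let k := PySem.Int.floordiv (st.2 * (q + N - 2)) q
        (st.1 ++ [k], k))
      ([1], 1)).1

-- ===== PRECONDITION & SPEC =====
def Spec_wn_reduced_weight_dimensions (N : Int) (max_q : Int) (out : List Int) : Prop := out = wn_reduced_weight_dimensions_alt N max_q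
instance (N : Int) (max_q : Int) (out : List Int) : Decidable (Spec_wn_reduced_weight_dimensions N max_q out) := by unfold Spec_wn_reduced_weight_dimensions; infer_instance

-- ===== CLAIM (what is proved, stated in full; the proofs are below) =====
def Claim_equal_wn_reduced_weight_dimensions : Prop := ∀ (N : Int) (max_q : Int), Dom_wn_reduced_weight_dimensions N max_q → Spec_wn_reduced_weight_dimensions N max_q (wn_reduced_weight_dimensions N max_q)

-- ===== LEMMAS AND PROOFS =====

-- the common value: K_q = C(q+r, r), as an Int
def pvBinom (r q : Nat) : Int := ((q + r).choose r : Int)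

-- the binomial recurrence in Int form, divisor r+1 (A's inner step)
lemma pvBinom_step_inner (q r : Nat) :
    pvBinom r q * ((q : Int) + (1 + r)) = pvBinom (r + 1) q * (1 + (r : Int)) := by
  have h := Nat.add_one_mul_choose_eq (q + r) r
  have h' : (q + r).choose r * (q + (1 + r)) = (q + (r + 1)).choose (r + 1) * (1 + r) := by
    rw [show q + (1 + r) = q + r + 1 by omega, show q + (r + 1) = q + r + 1 by omega,
      show 1 + r = r + 1 by omega, Nat.mul_comm]
    exact h
  unfold pvBinom
  exact_mod_cast h'

-- the binomial recurrence in Int form, divisor q+1 (B's step)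
lemma pvBinom_step_outer (q r : Nat) :
    pvBinom r q * ((1 + (q : Int)) + r) = pvBinom r (q + 1) * (1 + (q : Int)) := by
  have h := Nat.add_one_mul_choose_eq (q + r) q
  have s1 : (q + r).choose r = (q + r).choose q := by
    rw [← Nat.choose_symm (Nat.le_add_left r q)]; congr 1; omega
  have s2 : (q + r + 1).choose r = (q + r + 1).choose (q + 1) := by
    rw [← Nat.choose_symm (by omega : q + 1 ≤ q + r + 1)]; congr 1; omega
  have h' : (q + r).choose r * (1 + q + r) = (q + 1 + r).choose r * (1 + q) := by
    rw [show 1 + q + r = q + r + 1 by omega, show q + 1 + r = q + r + 1 by omega,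
      show 1 + q = q + 1 by omega, s1, s2, Nat.mul_comm]
    exact h
  unfold pvBinom
  have h'' : (q + 1 + r).choose r = (q + 1 + r).choose r := rfl
  exact_mod_cast h'

lemma floordiv_mul_cancel (c d : Int) (hd : 0 < d) :
    PySem.Int.floordiv (c * d) d = c := by
  rw [PySem.Int.floordiv_eq_ediv_of_pos hd]
  exact Int.mul_ediv_cancel c (by omega)

-- A's inner loop computes the binomial
lemma inner_eq (q r : Nat) :
    (PySem.List.pyRange 1 (1 + (r : Int))).foldl
      (fun k j => PySem.Int.floordiv (k * ((q : Int) + j)) j) 1 = pvBinom r q := by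
  induction r with
  | zero => simp [PySem.List.pyRange_one_eq_nil (by omega : (1:Int) ≤ 1), pvBinom]
  | succ r ih =>
    have hsplit : (1 : Int) + ((r : Nat) + 1 : Nat) = (1 + (r : Int)) + 1 := by push_cast; ring
    rw [hsplit, PySem.List.pyRange_one_succ_right (by omega), List.foldl_append, ih]
    simp only [List.foldl_cons, List.foldl_nil]
    rw [pvBinom_step_inner q r, floordiv_mul_cancel _ _ (by omega)]

-- A's value for N ≥ 3, as a map of binomials
lemma portA_eq (N max_q : Int) (hN : 3 ≤ N) :
    wn_reduced_weight_dimensions N max_q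
      = (List.range (max_q + 1).toNat).map (fun q => pvBinom (N - 2).toNat q) := by
  unfold wn_reduced_weight_dimensions
  rw [PySem.List.foldl_append_singleton_eq_map, List.nil_append,
    PySem.List.pyRange_one 0 (max_q + 1), List.map_map]
  simp only [sub_zero]
  apply List.map_congr_left
  intro q _
  simp only [Function.comp_apply, zero_add]
  have hr : N - 1 = 1 + (((N - 2).toNat : Nat) : Int) := by omega
  rw [hr, inner_eq q (N - 2).toNat]

-- B's loop invariant
lemma portB_loop (N : Int) (hN : 3 ≤ N) (t : Nat) :
    (PySem.List.pyRange 1 (1 + (t : Int))).foldl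
      (fun (st : List Int × Int) q =>
        let k := PySem.Int.floordiv (st.2 * (q + N - 2)) q
        (st.1 ++ [k], k))
      ([1], 1)
    = ((List.range (t + 1)).map (fun q => pvBinom (N - 2).toNat q),
       pvBinom (N - 2).toNat t) := by
  induction t with
  | zero =>
    simp [pvBinom]
  | succ t ih =>
    have hsplit : (1 : Int) + ((t + 1 : Nat) : Int) = (1 + (t : Int)) + 1 := by push_cast; ring
    rw [hsplit, PySem.List.pyRange_one_succ_right (by omega), List.foldl_append, ih]
    simp only [List.foldl_cons, List.foldl_nil]
    have harg : (1 : Int) + (t : Int) + N - 2 = (1 + (t : Int)) + ((N - 2).toNat : Int) := by omega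
    rw [harg, pvBinom_step_outer t (N - 2).toNat, floordiv_mul_cancel _ _ (by omega)]
    simp [List.range_succ]

-- ===== VERDICT (by name: the statement is the Claim_ definition above) =====
theorem wn_reduced_weight_dimensions_spec : Claim_equal_wn_reduced_weight_dimensions := by
  intro N max_q _
  unfold Spec_wn_reduced_weight_dimensions wn_reduced_weight_dimensions_alt
  by_cases hm : max_q < 0
  · -- both empty
    simp only [if_pos hm]
    unfold wn_reduced_weight_dimensions
    rw [PySem.List.pyRange_one_eq_nil (show max_q + 1 ≤ (0:Int) by omega)]
    rfl
  · rw [if_neg (by omega)]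
    by_cases hN : N ≤ 2
    · -- inner range empty: A yields all ones
      rw [if_pos hN]
      unfold wn_reduced_weight_dimensions
      rw [PySem.List.foldl_append_singleton_eq_map, List.nil_append,
        PySem.List.pyRange_one_eq_nil (by omega : N - 1 ≤ 1)]
      simp [PySem.List.pyRange_one, List.map_map, Function.comp_def, List.map_const', List.length_range]
    · rw [if_neg (by omega)]
      have ht : max_q + 1 = 1 + ((max_q.toNat : Nat) : Int) := by omega
      have htn : (max_q + 1).toNat = max_q.toNat + 1 := by omega
      rw [portA_eq N max_q (by omega), htn, ht, portB_loop N (by omega) max_q.toNat]
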